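-- pv_equiv track=rewrite | github.com/simonlamaze/string_tracker | main/tracker_point_automatic.py | get_black_st_pt_line
-- ===== SOURCE A (Python) =====
-- def get_black_st_pt_line(line):
--     #returns the list of indexes of first black pxls of each black string on the line, I have an idea about how to avoid counting several strings in one shape
--     # when they regroup because of oscillation : for each black , we count the number of white shapes around it in a small rectangle that cover each edge. For 1 string there'll be 2
--     # for 2 there'll be 4, 6 for 3, etc...
--     # Then once we know how many strings really hide in the black shape, we divide the black lin by this number to get the actual centre of each string.qqqq
--     indexes=[]
--     n=len(line)
--     i=0
--     was_white=True
--     count_b=0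
--     while i<n:
--         color=line[i]
--         if color==0:
--             if was_white:
--                 indexes.append(i)
--             was_white=False
--         elif color==255:
--             was_white=True
--         i+=1
--     return indexes
-- ===== SOURCE B (Python) =====
-- def get_black_st_pt_line(line):
--     # Two-level decomposition: segment the line into maximal runs separated by
--     # white (255) pixels, then report the first black (0) pixel of each
--     # non-white segment (segments may contain gray pixels, which are neither
--     # separators nor reported).
--     indexes = []
--     n = len(line)
--     i = 0
--     while i < n:
--         if line[i] == 255:
--             # skip a white run
--             i += 1
--             while i < n and line[i] == 255:
--                 i += 1
--         else:
--             # maximal non-white segment [i, j)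
--             j = i + 1
--             while j < n and line[j] != 255:
--                 j += 1
--             for k in range(i, j):
--                 if line[k] == 0:
--                     indexes.append(k)
--                     break
--             i = j
--     return indexes
-- ===== Notes on version B (the rewrite author's own statement) =====
-- stated objective: alternative
-- what changed: Replaces A's flat single-flag (was_white) state machine with a two-level pass: segment the line into maximal 255-separated runs, then report the first 0 of each non-white segment.
import Mathlib
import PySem

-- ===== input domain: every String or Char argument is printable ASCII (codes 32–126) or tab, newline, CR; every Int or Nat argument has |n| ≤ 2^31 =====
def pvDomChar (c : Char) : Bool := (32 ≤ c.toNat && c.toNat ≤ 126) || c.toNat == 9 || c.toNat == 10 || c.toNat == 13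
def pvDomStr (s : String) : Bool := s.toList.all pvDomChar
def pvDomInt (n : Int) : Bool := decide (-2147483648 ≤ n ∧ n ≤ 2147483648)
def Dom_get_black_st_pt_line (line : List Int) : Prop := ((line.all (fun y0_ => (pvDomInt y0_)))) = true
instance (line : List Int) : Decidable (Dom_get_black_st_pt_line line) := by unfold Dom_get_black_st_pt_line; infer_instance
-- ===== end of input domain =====

-- B replaces A's flat was_white state machine by a two-level pass (maximal 255-separated
-- segments, then first 0 of each non-white segment); objective: alternative decomposition.

-- ===== PORT A =====
-- A's while loop over i with state (indexes, was_white); the list is consumed head-first,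
-- i tracks the Python index.
def pvALoop : List Int → Int → Bool → List Int → List Int
  | [], _, _, indexes => indexes
  | color :: rest, i, was_white, indexes =>
    if color == 0 then
      pvALoop rest (i + 1) false (if was_white then indexes ++ [i] else indexes)
    else if color == 255 then
      pvALoop rest (i + 1) true indexes
    else
      pvALoop rest (i + 1) was_white indexes

def get_black_st_pt_line (line : List Int) : List Int :=
  pvALoop line 0 true []

-- ===== PORT B =====
-- first 0 of a segment, pos = absolute index of its head (B's inner `for k … break` loop)
def pvFirstZero : List Int → Int → Option Int
  | [], _ => none
  | c :: rest, pos => if c == 0 then some pos else pvFirstZero rest (pos + 1)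

-- outer segmentation loop of B: skip white runs, cut a maximal non-white segment,
-- report its first 0, continue after it
def pvBGo : List Int → Int → List Int
  | [], _ => []
  | c :: rest, pos =>
    if c == 255 then pvBGo rest (pos + 1)
    else
      let seg := c :: rest.takeWhile (fun x => !(x == 255))
      let tail := rest.dropWhile (fun x => !(x == 255))
      (match pvFirstZero seg pos with
       | some k => [k]
       | none => []) ++ pvBGo tail (pos + seg.length)
termination_by l _ => l.length
decreasing_by
  · simp
  · simp only [List.length_cons]
    have := List.length_dropWhile_le (p := fun x : Int => !(x == 255)) (l := rest)
    omega

def get_black_st_pt_line_alt (line : List Int) : List Int :=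
  pvBGo line 0

-- ===== PRECONDITION & SPEC =====
def Spec_get_black_st_pt_line (line : List Int) (out : List Int) : Prop := out = get_black_st_pt_line_alt line
instance (line : List Int) (out : List Int) : Decidable (Spec_get_black_st_pt_line line out) := by unfold Spec_get_black_st_pt_line; infer_instance

-- ===== CLAIM (what is proved, stated in full; the proofs are below) =====
def Claim_equal_get_black_st_pt_line : Prop := ∀ (line : List Int), Dom_get_black_st_pt_line line → Spec_get_black_st_pt_line line (get_black_st_pt_line line)

-- ===== LEMMAS AND PROOFS =====

-- one-step equations, proved once so the main induction only uses rw
theorem pvALoop_zero (rest : List Int) (i : Int) (w : Bool) (idx : List Int) :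
    pvALoop (0 :: rest) i w idx = pvALoop rest (i + 1) false (if w then idx ++ [i] else idx) := by
  simp [pvALoop]

theorem pvALoop_white (rest : List Int) (i : Int) (w : Bool) (idx : List Int) :
    pvALoop (255 :: rest) i w idx = pvALoop rest (i + 1) true idx := by
  simp [pvALoop]

theorem pvALoop_gray {c : Int} (h0 : c ≠ 0) (h255 : c ≠ 255) (rest : List Int) (i : Int)
    (w : Bool) (idx : List Int) :
    pvALoop (c :: rest) i w idx = pvALoop rest (i + 1) w idx := by
  simp [pvALoop, h0, h255]

theorem pvFZ_zero (rest : List Int) (pos : Int) :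
    pvFirstZero (0 :: rest) pos = some pos := by
  simp [pvFirstZero]

theorem pvFZ_cons {c : Int} (h0 : c ≠ 0) (rest : List Int) (pos : Int) :
    pvFirstZero (c :: rest) pos = pvFirstZero rest (pos + 1) := by
  simp [pvFirstZero, h0]

theorem pvTW_white (rest : List Int) :
    ((255 : Int) :: rest).takeWhile (fun x => !(x == 255)) = [] := by
  simp [List.takeWhile]

theorem pvDW_white (rest : List Int) :
    ((255 : Int) :: rest).dropWhile (fun x => !(x == 255)) = 255 :: rest := by
  simp [List.dropWhile]

theorem pvTW_cons {c : Int} (h : c ≠ 255) (rest : List Int) :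
    (c :: rest).takeWhile (fun x => !(x == 255)) = c :: rest.takeWhile (fun x => !(x == 255)) := by
  have hb : (c == (255 : Int)) = false := by simpa using h
  simp [List.takeWhile, hb]

theorem pvDW_cons {c : Int} (h : c ≠ 255) (rest : List Int) :
    (c :: rest).dropWhile (fun x => !(x == 255)) = rest.dropWhile (fun x => !(x == 255)) := by
  have hb : (c == (255 : Int)) = false := by simpa using h
  simp [List.dropWhile, hb]

theorem pvBGo_white (rest : List Int) (pos : Int) :
    pvBGo (255 :: rest) pos = pvBGo rest (pos + 1) := by
  simp [pvBGo]

theorem pvBGo_cons {c : Int} (h : c ≠ 255) (rest : List Int) (pos : Int) :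
    pvBGo (c :: rest) pos =
      (match pvFirstZero (c :: rest.takeWhile (fun x => !(x == 255))) pos with
       | some k => [k]
       | none => []) ++
      pvBGo (rest.dropWhile (fun x => !(x == 255)))
        (pos + ((c :: rest.takeWhile (fun x => !(x == 255))).length : Int)) := by
  have hb : (c == (255 : Int)) = false := by simpa using h
  rw [pvBGo]
  simp [hb]

-- a gray head is swallowed by B's segment without effect
theorem pvBGo_gray {c : Int} (h0 : c ≠ 0) (h255 : c ≠ 255) (rest : List Int) (pos : Int) :
    pvBGo (c :: rest) pos = pvBGo rest (pos + 1) := by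
  rw [pvBGo_cons h255, pvFZ_cons h0]
  match rest with
  | [] => simp [pvBGo, pvFirstZero]
  | d :: rest' =>
    by_cases hd : d = 255
    · subst hd
      rw [pvTW_white, pvDW_white, pvBGo_white]
      have hpos : pos + ((c :: ([] : List Int)).length : Int) = pos + 1 := by
        simp
      rw [hpos, pvBGo_white]
      simp [pvFirstZero]
    · rw [pvBGo_cons hd, pvTW_cons hd, pvDW_cons hd]
      have hpos : pos + ((c :: d :: rest'.takeWhile (fun x => !(x == 255))).length : Int) =
          pos + 1 + ((d :: rest'.takeWhile (fun x => !(x == 255))).length : Int) := by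
        simp only [List.length_cons]
        push_cast
        ring
      rw [hpos]

-- the two loop invariants, proved together by strong induction on the list length:
-- in the was_white=true state A computes acc ++ (B on the remaining list);
-- in the was_white=false state A ignores everything up to the next 255 (= the rest of
-- the current segment) and then behaves like B on the tail.
theorem pvMain (n : Nat) : ∀ (l : List Int), l.length ≤ n →
    (∀ (pos : Int) (acc : List Int), pvALoop l pos true acc = acc ++ pvBGo l pos) ∧
    (∀ (pos : Int) (acc : List Int), pvALoop l pos false acc =
      acc ++ pvBGo (l.dropWhile (fun x => !(x == 255)))
        (pos + ((l.takeWhile (fun x => !(x == 255))).length : Int))) := by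
  induction n with
  | zero =>
    intro l hl
    have : l = [] := List.eq_nil_of_length_eq_zero (Nat.le_zero.mp hl)
    subst this
    simp [pvALoop, pvBGo]
  | succ n ih =>
    intro l hl
    match l with
    | [] => simp [pvALoop, pvBGo]
    | c :: rest =>
      have hrest : rest.length ≤ n := by simpa using Nat.lt_succ_iff.mp (Nat.lt_of_lt_of_le (by simp) hl)
      have IH := ih rest hrest
      constructor
      · intro pos acc
        by_cases h0 : c = 0
        · subst h0
          rw [pvALoop_zero, if_pos rfl, IH.2, pvBGo_cons (by decide), pvFZ_zero]
          have hpos : pos + (((0 : Int) :: rest.takeWhile (fun x => !(x == 255))).length : Int) =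
              pos + 1 + ((rest.takeWhile (fun x => !(x == 255))).length : Int) := by
            simp only [List.length_cons]
            push_cast
            ring
          rw [hpos]
          simp
        · by_cases h255 : c = 255
          · subst h255
            rw [pvALoop_white, pvBGo_white, IH.1]
          · rw [pvALoop_gray h0 h255, pvBGo_gray h0 h255, IH.1]
      · intro pos acc
        by_cases h255 : c = 255
        · subst h255
          rw [pvALoop_white, IH.1, pvDW_white, pvTW_white, pvBGo_white]
          simp
        · have hstep : pvALoop (c :: rest) pos false acc = pvALoop rest (pos + 1) false acc := by
            by_cases h0 : c = 0
            · subst h0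
              rw [pvALoop_zero, if_neg (by simp)]
            · rw [pvALoop_gray h0 h255]
          rw [hstep, IH.2, pvDW_cons h255, pvTW_cons h255]
          have hpos : pos + ((c :: rest.takeWhile (fun x => !(x == 255))).length : Int) =
              pos + 1 + ((rest.takeWhile (fun x => !(x == 255))).length : Int) := by
            simp only [List.length_cons]
            push_cast
            ring
          rw [hpos]

-- ===== VERDICT (by name: the statement is the Claim_ definition above) =====
theorem get_black_st_pt_line_spec : Claim_equal_get_black_st_pt_line := by
  intro line _
  unfold Spec_get_black_st_pt_line get_black_st_pt_line get_black_st_pt_line_alt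
  simpa using (pvMain line.length line (le_refl _)).1 0 []
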